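-- pv_equiv track=rewrite | github.com/jittat/admapp | appl/header_utils.py | table_header_as_list_template
-- ===== SOURCE A (Python) =====
-- def extract_line(line):
--     """
--     >>> extract_line("* hello world")
--     ('hello world', 1)
--     >>> extract_line("** this  is a ** test!!")
--     ('this  is a ** test!!', 2)
--     """
--     depth = 0
--     l = len(line)
--     while (depth < l) and (line[depth] == '*'):
--         depth += 1
--     return (line[depth+1:], depth)
--
-- def parse_header(header):
--     """
--     >>> parse_header("* a\\n* b\\n* c")
--     [['a', []], ['b', []], ['c', []]]
--     >>> parse_header("* a\\n** b\\n* c")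
--     [['a', [['b', []]]], ['c', []]]
--     >>> parse_header("* a\\n** b\\n** c\\n*** d\\n* e")
--     [['a', [['b', []], ['c', [['d', []]]]]], ['e', []]]
--     """
--     nodes = []
--     current_nodes = []
--     for line in header.split("\n"):
--         title,depth = extract_line(line.strip())
--         if depth == 0:
--             continue
--         this_node = [title,[]]
--         if depth == 1:
--             nodes.append(this_node)
--             current_nodes = [this_node]
--         else:
--             current_nodes[depth-2][1].append(this_node)
--             current_nodes = current_nodes[:depth-1]
--             current_nodes.append(this_node)
--
--     return nodes
--
-- def table_header_as_list_template(header):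
--     if header == '':
--         return ''
--
--     nodes = parse_header(header)
--     param_count = [0]
--
--     def build(node):
--         title = node[0]
--         children = node[1]
--
--         if len(children) == 0:
--             param_count[0] += 1
--             return '<li>%s: {%d}</li>' % (title, param_count[0]-1)
--         else:
--             children_strs = [build(child) for child in children]
--             return (('<li>%s\n<ul>\n' % (title,)) +
--                     '\n'.join(children_strs) +
--                     '\n</ul></li>')
--
--     output = [build(node) for node in nodes]
--     return "<ul>" + "\n".join(output) + "</ul>"
-- ===== SOURCE B (Python) =====
-- def table_header_as_list_template(header):
--     if header == '':
--         return ''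
--     # one pass: flat (title, depth) token list, no tree is ever built
--     items = []
--     for line in header.split('\n'):
--         s = line.strip()
--         d = 0
--         while d < len(s) and s[d] == '*':
--             d += 1
--         if d != 0:
--             items.append((s[d + 1:], d))
--
--     def render(items, d, n):
--         # renders the run of siblings at depth d covering all of `items`;
--         # returns (list of '<li>…' strings, next leaf number)
--         if not items:
--             return [], n
--         title = items[0][0]
--         rest = items[1:]
--         k = 0
--         while k < len(rest) and rest[k][1] > d:
--             k += 1
--         sub, rest2 = rest[:k], rest[k:]
--         if not sub:
--             s = '<li>%s: {%d}</li>' % (title, n)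
--             n += 1
--         else:
--             cs, n = render(sub, d + 1, n)
--             s = '<li>%s\n<ul>\n%s\n</ul></li>' % (title, '\n'.join(cs))
--         ss, n = render(rest2, d, n)
--         return [s] + ss, n
--
--     parts, _ = render(items, 1, 0)
--     return '<ul>' + '\n'.join(parts) + '</ul>'
-- ===== Notes on version B (the rewrite author's own statement) =====
-- stated objective: alternative
-- what changed: A builds a nested tree of [title, children] lists by mutating a current-nodes stack and then renders it with a recursive build(); B never builds a tree: it collects a flat (title, depth) token list in one pass and renders the HTML directly by recursive descent over that list, numbering leaves inline.
-- outside the precondition, e.g. on table_header_as_list_template('** a'): A raises IndexError, B returns '<ul><li>a: {0}</li></ul>'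
import Mathlib
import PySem

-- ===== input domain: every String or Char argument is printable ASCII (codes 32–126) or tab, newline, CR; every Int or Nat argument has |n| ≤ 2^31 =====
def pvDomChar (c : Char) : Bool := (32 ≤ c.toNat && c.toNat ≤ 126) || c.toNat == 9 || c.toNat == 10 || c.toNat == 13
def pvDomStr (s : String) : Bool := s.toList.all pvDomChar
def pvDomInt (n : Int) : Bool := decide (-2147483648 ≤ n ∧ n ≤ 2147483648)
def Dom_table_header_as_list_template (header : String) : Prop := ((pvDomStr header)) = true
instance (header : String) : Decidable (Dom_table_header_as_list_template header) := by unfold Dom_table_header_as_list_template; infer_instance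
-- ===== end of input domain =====

-- B replaces A's two-phase mutation-built nested-list tree + recursive build() by a single
-- flat (title, depth) token list rendered directly by recursive descent (objective: alternative).

-- ===== PORT A =====
-- A's nested python lists [title, children] are encoded first-child/next-sibling
-- (a nested 'List PNode' inductive is not available); a forest is a sibling chain.
inductive PTree where
  | nil : PTree
  | node : String → PTree → PTree → PTree   -- title, children, next sibling
deriving DecidableEq, Repr

-- the while loop of extract_line counting leading asterisks
def starDepth : List Char → Nat
  | '*' :: cs => starDepth cs + 1
  | _ => 0

def extract_line (line : String) : String × Nat :=
  let depth := starDepth line.toList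
  (PySem.Str.slice line (some ((depth : Int) + 1)) none, depth)

-- nodes.append(this_node): append at the end of the top-level sibling chain
def appendSib : PTree → String → PTree
  | PTree.nil, t => PTree.node t PTree.nil PTree.nil
  | PTree.node a c r, t => PTree.node a c (appendSib r t)

-- current_nodes[depth-2][1].append(this_node): current_nodes is always the rightmost
-- spine of the forest, so the mutation is a functional update along that spine;
-- none = the IndexError Python raises when the spine is shorter than depth-1.
def insertAt : PTree → Nat → String → Option PTree
  | f, 1, t => some (appendSib f t)
  | PTree.node a c PTree.nil, k+2, t =>
      (insertAt c (k+1) t).map (fun c' => PTree.node a c' PTree.nil)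
  | PTree.node a c (PTree.node b c2 r2), k+2, t =>
      (insertAt (PTree.node b c2 r2) (k+2) t).map (fun r' => PTree.node a c r')
  | _, _, _ => none

def parseStep (acc : Option PTree) (line : String) : Option PTree :=
  match acc with
  | none => none
  | some nodes =>
    let td := extract_line (PySem.Str.strip line)
    if td.2 = 0 then some nodes
    else insertAt nodes td.2 td.1

def parse_header (header : String) : Option PTree :=
  ((PySem.Str.split? header "\n").getD []).foldl parseStep (some PTree.nil)

-- build(node) over the forest, threading param_count
def buildF : PTree → Int → List String × Int
  | PTree.nil, n => ([], n)
  | PTree.node t c r, n =>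
    match c with
    | PTree.nil =>
      let n1 := n + 1
      let s := "<li>" ++ t ++ ": {" ++ PySem.Int.toStr (n1 - 1) ++ "}</li>"
      (s :: (buildF r n1).1, (buildF r n1).2)
    | PTree.node b c2 r2 =>
      let cs := buildF (PTree.node b c2 r2) n
      let s := "<li>" ++ t ++ "\n<ul>\n" ++ PySem.Str.join "\n" cs.1 ++ "\n</ul></li>"
      (s :: (buildF r cs.2).1, (buildF r cs.2).2)

def table_header_as_list_template (header : String) : String :=
  if header = "" then ""
  else
    match parse_header header with
    | none => ""   -- Python raises IndexError here; excluded by Pre_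
    | some nodes => "<ul>" ++ PySem.Str.join "\n" (buildF nodes 0).1 ++ "</ul>"

-- ===== PORT B =====
def bStep (items : List (String × Nat)) (line : String) : List (String × Nat) :=
  let s := PySem.Str.strip line
  let d := starDepth s.toList   -- the same leading-star while loop as A's extract_line
  if d = 0 then items
  else items ++ [(PySem.Str.slice s (some ((d : Int) + 1)) none, d)]

def bTokens (header : String) : List (String × Nat) :=
  ((PySem.Str.split? header "\n").getD []).foldl bStep []

-- render(items, d, n): recursive descent over the flat token list
def renderB : List (String × Nat) → Nat → Int → List String × Int
  | [], _, n => ([], n)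
  | (t, _) :: rest, d, n =>
    let sub := rest.takeWhile (fun p => d < p.2)
    let rest2 := rest.dropWhile (fun p => d < p.2)
    if sub.isEmpty then
      let s := "<li>" ++ t ++ ": {" ++ PySem.Int.toStr n ++ "}</li>"
      (s :: (renderB rest2 d (n + 1)).1, (renderB rest2 d (n + 1)).2)
    else
      let cs := renderB sub (d + 1) n
      let s := "<li>" ++ t ++ "\n<ul>\n" ++ PySem.Str.join "\n" cs.1 ++ "\n</ul></li>"
      (s :: (renderB rest2 d cs.2).1, (renderB rest2 d cs.2).2)
  termination_by items _ _ => items.length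
  decreasing_by
    all_goals exact Nat.lt_succ_of_le (by first
      | exact (List.takeWhile_sublist _).length_le
      | exact (List.dropWhile_sublist _).length_le)

def table_header_as_list_template_alt (header : String) : String :=
  if header = "" then ""
  else "<ul>" ++ PySem.Str.join "\n" (renderB (bTokens header) 1 0).1 ++ "</ul>"

-- ===== PRECONDITION & SPEC =====
def headerDepths (header : String) : List Nat :=
  (((PySem.Str.split? header "\n").getD []).map
    (fun line => ((PySem.Str.strip line).toList.takeWhile (fun c => c == '*')).length)).filter
    (fun d => d != 0)

-- A raises IndexError exactly when some line's leading-asterisk depth jumps by more than one above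
-- the previous depth (0 before the first starred line); Pre_ excludes exactly those inputs.
def Pre_table_header_as_list_template (header : String) : Prop :=
  List.IsChain (fun a b => b ≤ a + 1) (0 :: headerDepths header)

instance (header : String) : Decidable (Pre_table_header_as_list_template header) := by
  unfold Pre_table_header_as_list_template; infer_instance

def pvWitness_table_header_as_list_template : String := "* a\n** b\n* c"

def Spec_table_header_as_list_template (header : String) (out : String) : Prop := out = table_header_as_list_template_alt header
instance (header : String) (out : String) : Decidable (Spec_table_header_as_list_template header out) := by unfold Spec_table_header_as_list_template; infer_instance

-- ===== CLAIM (what is proved, stated in full; the proofs are below) =====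
def Claim_equal_table_header_as_list_template : Prop := ∀ (header : String), Dom_table_header_as_list_template header → Pre_table_header_as_list_template header → Spec_table_header_as_list_template header (table_header_as_list_template header)

-- ===== LEMMAS AND PROOFS =====

-- titles with their depths, in A's build order (pre-order)
def flatten : PTree → Nat → List (String × Nat)
  | PTree.nil, _ => []
  | PTree.node t c r, d => (t, d) :: (flatten c (d+1) ++ flatten r d)

-- length of the rightmost spine (= len(current_nodes) in Python A)
def spineLen : PTree → Nat
  | PTree.nil => 0
  | PTree.node _ c PTree.nil => spineLen c + 1
  | PTree.node _ _ (PTree.node b c2 r2) => spineLen (PTree.node b c2 r2)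

-- the token a line contributes (none = skipped depth-0 line)
def tokOf (line : String) : Option (String × Nat) :=
  let s := PySem.Str.strip line
  let d := starDepth s.toList
  if d = 0 then none else some (PySem.Str.slice s (some ((d : Int) + 1)) none, d)

def tstep (acc : Option PTree) (p : String × Nat) : Option PTree :=
  match acc with
  | none => none
  | some f => insertAt f p.2 p.1

theorem takeWhile_star_length (cs : List Char) :
    (cs.takeWhile (fun c => c == '*')).length = starDepth cs := by
  induction cs with
  | nil => rfl
  | cons c cs ih =>
    by_cases h : c = '*' <;> simp [starDepth, h, ih]

theorem spineLen_appendSib (f : PTree) (t : String) : spineLen (appendSib f t) = 1 := by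
  induction f with
  | nil => rfl
  | node a c r ihc ihr =>
    cases r with
    | nil => simp [appendSib, spineLen]
    | node b c2 r2 =>
      simp only [appendSib] at ihr ⊢
      simpa [spineLen] using ihr

theorem flatten_appendSib (f : PTree) (t : String) (d : Nat) :
    flatten (appendSib f t) d = flatten f d ++ [(t, d)] := by
  induction f generalizing d with
  | nil => simp [appendSib, flatten]
  | node a c r ihc ihr => simp [appendSib, flatten, ihr]

theorem insertAt_flatten (f : PTree) : ∀ (k : Nat) (t : String) (f' : PTree),
    insertAt f (k+1) t = some f' → ∀ d, flatten f' d = flatten f d ++ [(t, d + k)] := by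
  induction f with
  | nil =>
    intro k t f' h d
    cases k with
    | zero =>
      simp only [insertAt, Option.some.injEq] at h
      subst h
      simp [flatten_appendSib]
    | succ k => simp [insertAt] at h
  | node a c r ihc ihr =>
    intro k t f' h d
    cases k with
    | zero =>
      simp only [insertAt, Option.some.injEq] at h
      subst h
      simp [flatten_appendSib]
    | succ k =>
      cases r with
      | nil =>
        simp only [insertAt, Option.map_eq_some_iff] at h
        obtain ⟨c', hc', rfl⟩ := h
        have hk : d + 1 + k = d + (k + 1) := by omega
        simp [flatten, ihc k t c' hc' (d+1), hk]
      | node b c2 r2 =>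
        simp only [insertAt, Option.map_eq_some_iff] at h
        obtain ⟨r', hr', rfl⟩ := h
        simp [flatten, ihr (k+1) t r' hr' d]

theorem spineLen_pos_ne_nil (f : PTree) (h : 0 < spineLen f) : f ≠ PTree.nil := by
  cases f <;> simp_all [spineLen]

theorem insertAt_some (f : PTree) : ∀ (k : Nat) (t : String), k ≤ spineLen f →
    ∃ f', insertAt f (k+1) t = some f' ∧ spineLen f' = k + 1 := by
  induction f with
  | nil =>
    intro k t hk
    simp only [spineLen, Nat.le_zero] at hk
    subst hk
    exact ⟨appendSib PTree.nil t, by simp [insertAt], spineLen_appendSib _ _⟩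
  | node a c r ihc ihr =>
    intro k t hk
    cases k with
    | zero => exact ⟨appendSib (PTree.node a c r) t, by simp [insertAt], spineLen_appendSib _ _⟩
    | succ k =>
      cases r with
      | nil =>
        simp only [spineLen] at hk
        obtain ⟨c', hc', hsc⟩ := ihc k t (by omega)
        refine ⟨PTree.node a c' PTree.nil, ?_, ?_⟩
        · simp [insertAt, hc']
        · simp [spineLen, hsc]
      | node b c2 r2 =>
        simp only [spineLen] at hk
        obtain ⟨r', hr', hsr⟩ := ihr (k+1) t hk
        have hne : r' ≠ PTree.nil := spineLen_pos_ne_nil r' (by omega)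
        refine ⟨PTree.node a c r', ?_, ?_⟩
        · simp [insertAt, hr']
        · cases r' with
          | nil => exact absurd rfl hne
          | node x y z => simpa [spineLen] using hsr

theorem takeWhile_append_all {α : Type} (p : α → Bool) (l1 l2 : List α)
    (h1 : ∀ x ∈ l1, p x = true) (h2 : ∀ x ∈ l2.head?, p x = false) :
    (l1 ++ l2).takeWhile p = l1 ∧ (l1 ++ l2).dropWhile p = l2 := by
  induction l1 with
  | nil =>
    cases l2 with
    | nil => simp
    | cons x t => simp [h2 x (by simp)]
  | cons a l1 ih =>
    have ha : p a = true := h1 a (by simp)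
    have := ih (fun x hx => h1 x (by simp [hx]))
    simp [ha, this]

theorem flatten_depth_ge (f : PTree) : ∀ d, ∀ p ∈ flatten f d, d ≤ p.2 := by
  induction f with
  | nil => intro d p hp; simp [flatten] at hp
  | node t c r ihc ihr =>
    intro d p hp
    simp only [flatten, List.mem_cons, List.mem_append] at hp
    rcases hp with rfl | hc | hr
    · rfl
    · exact Nat.le_of_succ_le (ihc (d+1) p hc)
    · exact ihr d p hr

theorem renderB_flatten (f : PTree) : ∀ (d : Nat) (n : Int),
    renderB (flatten f (d+1)) (d+1) n = buildF f n := by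
  induction f with
  | nil => intro d n; simp [flatten, renderB, buildF]
  | node t c r ihc ihr =>
    intro d n
    have h1 : ∀ x ∈ flatten c (d+2), (fun p : String × Nat => decide (d+1 < p.2)) x = true := by
      intro x hx
      have := flatten_depth_ge c (d+2) x hx
      simp only [decide_eq_true_eq]
      omega
    have h2 : ∀ x ∈ (flatten r (d+1)).head?,
        (fun p : String × Nat => decide (d+1 < p.2)) x = false := by
      cases r with
      | nil => simp [flatten]
      | node b c2 r2 =>
        intro x hx
        simp only [flatten, List.head?_cons, Option.mem_def, Option.some.injEq] at hx
        subst hx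
        simp
    obtain ⟨htw, hdw⟩ := takeWhile_append_all _ _ _ h1 h2
    rw [show flatten (PTree.node t c r) (d+1)
          = (t, d+1) :: (flatten c (d+2) ++ flatten r (d+1)) from rfl]
    rw [renderB]
    simp only [htw, hdw]
    cases c with
    | nil =>
      simp only [flatten, List.isEmpty_nil, if_true]
      rw [ihr d (n+1)]
      simp [buildF]
    | node b c2 r2 =>
      have hne : (flatten (PTree.node b c2 r2) (d+2)).isEmpty = false := by
        simp [flatten]
      simp only [hne, Bool.false_eq_true, if_false]
      rw [ihc (d+1) n, ihr d _]
      simp [buildF]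

theorem bTokens_filterMap (lines : List String) (acc : List (String × Nat)) :
    lines.foldl bStep acc = acc ++ lines.filterMap tokOf := by
  induction lines generalizing acc with
  | nil => simp
  | cons line ls ih =>
    simp only [List.foldl_cons, List.filterMap_cons]
    by_cases h : starDepth (PySem.Chars.strip line.toList) = 0
    · simp [bStep, tokOf, h, ih]
    · simp [bStep, tokOf, h, ih]

theorem parse_filterMap (lines : List String) (acc : Option PTree) :
    lines.foldl parseStep acc = (lines.filterMap tokOf).foldl tstep acc := by
  induction lines generalizing acc with
  | nil => simp
  | cons line ls ih =>
    simp only [List.foldl_cons, List.filterMap_cons]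
    by_cases h : starDepth (PySem.Chars.strip line.toList) = 0 <;>
      cases acc <;>
        simp [parseStep, extract_line, tokOf, tstep, h, ih]

theorem depths_filterMap (lines : List String) :
    (lines.map (fun line => starDepth (PySem.Str.strip line).toList)).filter (fun d => d != 0)
      = (lines.filterMap tokOf).map (·.2) := by
  induction lines with
  | nil => rfl
  | cons line ls ih =>
    simp only [PySem.Str.toList_strip] at ih
    by_cases h : starDepth (PySem.Chars.strip line.toList) = 0 <;>
      simp [tokOf, h, ih]

theorem tok_ne_zero (lines : List String) : ∀ p ∈ lines.filterMap tokOf, p.2 ≠ 0 := by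
  intro p hp
  rw [List.mem_filterMap] at hp
  obtain ⟨line, -, htok⟩ := hp
  by_cases h : starDepth (PySem.Chars.strip line.toList) = 0
  · simp [tokOf, h] at htok
  · simp only [tokOf, PySem.Str.toList_strip, h, if_false, Option.some.injEq] at htok
    rw [← htok]
    simpa using h

theorem fold_insert (toks : List (String × Nat)) : ∀ f : PTree,
    List.IsChain (fun a b => b ≤ a + 1) (spineLen f :: toks.map (·.2)) →
    (∀ p ∈ toks, p.2 ≠ 0) →
    ∃ f', toks.foldl tstep (some f) = some f' ∧ flatten f' 1 = flatten f 1 ++ toks := by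
  induction toks with
  | nil => intro f _ _; exact ⟨f, rfl, by simp⟩
  | cons p toks ih =>
    intro f hch hnz
    obtain ⟨t, d⟩ := p
    have hd0 : d ≠ 0 := hnz (t, d) (by simp)
    obtain ⟨k, rfl⟩ : ∃ k, d = k + 1 := ⟨d - 1, by omega⟩
    rw [List.map_cons, List.isChain_cons_cons] at hch
    obtain ⟨hle, hch⟩ := hch
    obtain ⟨f1, hins, hsp⟩ := insertAt_some f k t (by omega)
    obtain ⟨f', hfold, hflat⟩ := ih f1 (by rw [hsp]; exact hch)
      (fun q hq => hnz q (by simp [hq]))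
    refine ⟨f', ?_, ?_⟩
    · simpa [tstep, hins] using hfold
    · rw [hflat, insertAt_flatten f k t f1 hins 1]
      have hk : 1 + k = k + 1 := Nat.add_comm 1 k
      simp [hk]

-- ===== VERDICT (by name: the statement is the Claim_ definition above) =====
theorem table_header_as_list_template_spec : Claim_equal_table_header_as_list_template := by
  intro header hDom hPre
  unfold Spec_table_header_as_list_template
  by_cases hE : header = ""
  · simp [table_header_as_list_template, table_header_as_list_template_alt, hE]
  · have hP : List.IsChain (fun a b => b ≤ a + 1)
        (0 :: (((PySem.Str.split? header "\n").getD []).filterMap tokOf).map (·.2)) := by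
      unfold Pre_table_header_as_list_template headerDepths at hPre
      simp only [takeWhile_star_length] at hPre
      rwa [depths_filterMap] at hPre
    obtain ⟨f', hfold, hflat⟩ := fold_insert _ PTree.nil (by simpa [spineLen] using hP)
      (tok_ne_zero _)
    have hparse : parse_header header = some f' := by
      rw [parse_header, parse_filterMap]; exact hfold
    have htoks : ((PySem.Str.split? header "\n").getD []).filterMap tokOf = flatten f' 1 := by
      rw [hflat]; simp [flatten]
    have htoksB : bTokens header = flatten f' 1 := by
      rw [bTokens, bTokens_filterMap, ← htoks]; simp
    rw [table_header_as_list_template, table_header_as_list_template_alt]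
    simp only [hE, if_false, hparse]
    rw [htoksB, renderB_flatten f' 0 0]
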